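-- pv_equiv track=rewrite | github.com/wangtae/domaeka | server-kkobot/games/omok/engine/rule_engine.py | is_continuous_pattern
-- ===== SOURCE A (Python) =====
-- def is_continuous_pattern(pattern, color, length):
--     """
--     패턴이 연속된 length개의 color를 포함하는지 확인
--     """
--     continuous_count = 0
--     for value in pattern:
--         if value == color:
--             continuous_count += 1
--             if continuous_count == length:
--                 return True
--         else:
--             continuous_count = 0
--     return False
-- ===== SOURCE B (Python) =====
-- def is_continuous_pattern(pattern, color, length):
--     """
--     패턴이 연속된 length개의 color를 포함하는지 확인
--     (run-decomposition: scan maximal runs of equal values and test run length)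
--     """
--     if length <= 0:
--         return False
--     n = len(pattern)
--     i = 0
--     while i < n:
--         j = i
--         while j < n and pattern[j] == pattern[i]:
--             j += 1
--         if pattern[i] == color and j - i >= length:
--             return True
--         i = j
--     return False
-- ===== Notes on version B (the rewrite author's own statement) =====
-- stated objective: alternative
-- what changed: Replaces A's element-by-element counter with a reset by a two-pointer decomposition of the pattern into maximal runs of equal values, testing each run's length at once (with a natural positive-length guard).
import Mathlib
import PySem

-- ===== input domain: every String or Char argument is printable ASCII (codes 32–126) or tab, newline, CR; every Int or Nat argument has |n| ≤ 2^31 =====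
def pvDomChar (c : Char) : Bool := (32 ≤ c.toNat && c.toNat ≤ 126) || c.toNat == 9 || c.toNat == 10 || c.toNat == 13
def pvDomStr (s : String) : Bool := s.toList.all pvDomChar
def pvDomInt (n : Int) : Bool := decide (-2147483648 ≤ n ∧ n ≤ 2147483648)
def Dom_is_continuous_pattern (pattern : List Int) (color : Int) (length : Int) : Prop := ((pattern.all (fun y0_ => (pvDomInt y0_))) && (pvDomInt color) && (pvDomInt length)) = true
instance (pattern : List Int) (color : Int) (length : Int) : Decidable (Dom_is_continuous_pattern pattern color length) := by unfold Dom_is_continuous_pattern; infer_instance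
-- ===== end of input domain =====

-- B replaces A's running counter with a scan over maximal runs of equal values (alternative, same cost).

-- ===== PORT A =====
-- loop over pattern with counter `c`, early return True when c reaches length
def isContPatA_aux (color len : Int) : List Int → Int → Bool
  | [], _ => false
  | v :: t, c =>
    if v = color then
      (if c + 1 = len then true else isContPatA_aux color len t (c + 1))
    else isContPatA_aux color len t 0

def is_continuous_pattern (pattern : List Int) (color : Int) (length : Int) : Bool :=
  isContPatA_aux color length pattern 0

-- ===== PORT B =====
-- inner while loop of B: the run `takeWhile (· = v)`; outer loop resumes at `dropWhile (· = v)`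
def isContPatB_runs (color len : Int) : List Int → Bool
  | [] => false
  | v :: t =>
    let run := t.takeWhile (fun y => y = v)
    if v = color ∧ ((run.length : Int) + 1 ≥ len) then true
    else isContPatB_runs color len (t.dropWhile (fun y => y = v))
termination_by xs => xs.length
decreasing_by
  simpa using Nat.lt_succ_of_le (List.length_dropWhile_le _ _)

def is_continuous_pattern_alt (pattern : List Int) (color : Int) (length : Int) : Bool :=
  if length ≤ 0 then false else isContPatB_runs color length pattern

-- ===== PRECONDITION & SPEC =====
def Spec_is_continuous_pattern (pattern : List Int) (color : Int) (length : Int) (out : Bool) : Prop := out = is_continuous_pattern_alt pattern color length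
instance (pattern : List Int) (color : Int) (length : Int) (out : Bool) : Decidable (Spec_is_continuous_pattern pattern color length out) := by unfold Spec_is_continuous_pattern; infer_instance

-- ===== CLAIM (what is proved, stated in full; the proofs are below) =====
def Claim_equal_is_continuous_pattern : Prop := ∀ (pattern : List Int) (color : Int) (length : Int), Dom_is_continuous_pattern pattern color length → Spec_is_continuous_pattern pattern color length (is_continuous_pattern pattern color length)

-- ===== LEMMAS AND PROOFS =====

-- with a nonpositive target length, A's counter (which stays ≥ 0 and only tests after +1) never fires
lemma auxA_nonpos (color len : Int) (hlen : len ≤ 0) :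
    ∀ (xs : List Int) (c : Int), 0 ≤ c → isContPatA_aux color len xs c = false := by
  intro xs
  induction xs with
  | nil => intro c _; rfl
  | cons v t ih =>
    intro c hc
    simp only [isContPatA_aux]
    split_ifs with h1 h2
    · omega
    · exact ih (c + 1) (by omega)
    · exact ih 0 le_rfl

-- skipping a block of non-color values from counter 0 leaves the counter at 0
lemma auxA_skip (color len : Int) :
    ∀ (ys rest : List Int), (∀ y ∈ ys, y ≠ color) →
      isContPatA_aux color len (ys ++ rest) 0 = isContPatA_aux color len rest 0 := by
  intro ys
  induction ys with
  | nil => intro rest _; rfl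
  | cons y ys ih =>
    intro rest hall
    have hy : y ≠ color := hall y (by simp)
    simp only [List.cons_append, isContPatA_aux, if_neg hy]
    exact ih rest (fun z hz => hall z (by simp [hz]))

-- any starting counter is reset when the next value is not the color (or the list is empty)
lemma auxA_reset (color len : Int) (rest : List Int)
    (hhead : ∀ h t, rest = h :: t → h ≠ color) (c : Int) :
    isContPatA_aux color len rest c = isContPatA_aux color len rest 0 := by
  cases rest with
  | nil => rfl
  | cons h t =>
    have : h ≠ color := hhead h t rfl
    simp [isContPatA_aux, this]

-- consuming a block of color values: early True iff the counter would reach len inside it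
lemma auxA_run (color len : Int) :
    ∀ (ys : List Int), (∀ y ∈ ys, y = color) → ∀ (rest : List Int) (c : Int), 0 ≤ c → c < len →
      isContPatA_aux color len (ys ++ rest) c =
        (if len ≤ c + (ys.length : Int) then true
         else isContPatA_aux color len rest (c + (ys.length : Int))) := by
  intro ys
  induction ys with
  | nil =>
    intro _ rest c _ hclt
    simp only [List.nil_append, List.length_nil]
    rw [if_neg (by omega)]
    simp
  | cons y ys ih =>
    intro hall rest c hc hclt
    have hy : y = color := hall y (by simp)
    simp only [List.cons_append, isContPatA_aux, if_pos hy]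
    by_cases h1 : c + 1 = len
    · rw [if_pos h1, if_pos (by simp; omega)]
    · rw [if_neg h1,
        ih (fun z hz => hall z (by simp [hz])) rest (c + 1) (by omega) (by omega)]
      simp only [List.length_cons]
      push_cast
      split_ifs with h2 h3 h3
      · rfl
      · omega
      · omega
      · congr 1; ring

-- main correspondence: for positive len, A's counter scan equals B's run scan
lemma auxA_eq_runs (color len : Int) (hlen : 0 < len) :
    ∀ (n : Nat) (xs : List Int), xs.length ≤ n →
      isContPatA_aux color len xs 0 = isContPatB_runs color len xs := by
  intro n
  induction n with
  | zero =>
    intro xs hn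
    have : xs = [] := List.eq_nil_of_length_eq_zero (Nat.le_zero.mp hn)
    subst this; simp [isContPatA_aux, isContPatB_runs]
  | succ n ih =>
    intro xs hn
    cases xs with
    | nil => simp [isContPatA_aux, isContPatB_runs]
    | cons v t =>
      have hsplit : t = t.takeWhile (fun y => y = v) ++ t.dropWhile (fun y => y = v) :=
        (List.takeWhile_append_dropWhile).symm
      have hdwlen : (t.dropWhile (fun y => y = v)).length ≤ n := by
        have := List.length_dropWhile_le (fun y : Int => decide (y = v)) t
        simp only [List.length_cons] at hn
        omega
      have hdwhead : ∀ h tl, t.dropWhile (fun y => y = v) = h :: tl → h ≠ v := by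
        intro h tl heq hcontra
        have := List.head?_dropWhile_not (fun y : Int => decide (y = v)) t
        rw [heq] at this
        simp [hcontra] at this
      by_cases hv : v = color
      · -- A consumes v then the rest of the run; B tests the whole run at once
        simp only [isContPatA_aux, isContPatB_runs]
        rw [if_pos hv]
        have htw : ∀ y ∈ t.takeWhile (fun y => y = v), y = v := by
          intro y hy; simpa using List.mem_takeWhile_imp hy
        by_cases h1 : (0 : Int) + 1 = len
        · rw [if_pos h1, if_pos ⟨hv, by omega⟩]
        · rw [if_neg h1, zero_add]
          conv_lhs => rw [hsplit]
          rw [auxA_run color len (t.takeWhile (fun y => y = v))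
              (fun y hy => (htw y hy).trans hv)
              (t.dropWhile (fun y => y = v)) 1 (by omega) (by omega)]
          by_cases h2 : len ≤ 1 + ((t.takeWhile (fun y => y = v)).length : Int)
          · rw [if_pos h2, if_pos ⟨hv, by omega⟩]
          · rw [if_neg h2, if_neg (by rintro ⟨-, h⟩; omega)]
            rw [auxA_reset color len _ (by
              intro h tl heq hcontra
              exact hdwhead h tl heq (hcontra.trans hv.symm))]
            exact ih _ hdwlen
      · -- A walks through the run with counter 0; B drops the whole run
        simp only [isContPatA_aux, isContPatB_runs]
        rw [if_neg hv, if_neg (fun h => hv h.1)]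
        conv_lhs => rw [hsplit]
        rw [auxA_skip color len _ _ (by
          intro y hy hyc
          have : y = v := by simpa using List.mem_takeWhile_imp hy
          exact hv (this ▸ hyc))]
        exact ih _ hdwlen

-- ===== VERDICT (by name: the statement is the Claim_ definition above) =====
theorem is_continuous_pattern_spec : Claim_equal_is_continuous_pattern := by
  intro pattern color length _
  unfold Spec_is_continuous_pattern is_continuous_pattern is_continuous_pattern_alt
  by_cases hlen : length ≤ 0
  · rw [if_pos hlen, auxA_nonpos color length hlen pattern 0 le_rfl]
  · rw [if_neg hlen]
    exact auxA_eq_runs color length (by omega) pattern.length pattern le_rfl
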